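-- pv_equiv track=rewrite | github.com/s-hager/desktop-widget | app.py | replaceCurrencySymbols
-- ===== SOURCE A (Python) =====
-- def replaceCurrencySymbols(text):
--   currency_symbols = {
--       "USD": "$",
--       "EUR": "€",
--       "JPY": "¥",
--       "GBP": "£",
--   }
--   for currency_code, currency_symbol in currency_symbols.items():
--       text = text.replace(currency_code, currency_symbol)
--   return text
-- ===== SOURCE B (Python) =====
-- def replaceCurrencySymbols(text):
--     mapping = {
--         "USD": "$",
--         "EUR": "\u20ac",
--         "JPY": "\u00a5",
--         "GBP": "\u00a3",
--     }
--     out = []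
--     i = 0
--     n = len(text)
--     while i < n:
--         sym = mapping.get(text[i:i+3])
--         if sym is not None:
--             out.append(sym)
--             i += 3
--         else:
--             out.append(text[i])
--             i += 1
--     return "".join(out)
-- ===== Notes on version B (the rewrite author's own statement) =====
-- stated objective: alternative
-- what changed: B replaces A's four sequential full-text str.replace passes (one per currency code) with a single left-to-right scan that looks each 3-character window up in a dict and advances past matches; correct because the codes are disjoint and the symbols never re-create a code.
import Mathlib
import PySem

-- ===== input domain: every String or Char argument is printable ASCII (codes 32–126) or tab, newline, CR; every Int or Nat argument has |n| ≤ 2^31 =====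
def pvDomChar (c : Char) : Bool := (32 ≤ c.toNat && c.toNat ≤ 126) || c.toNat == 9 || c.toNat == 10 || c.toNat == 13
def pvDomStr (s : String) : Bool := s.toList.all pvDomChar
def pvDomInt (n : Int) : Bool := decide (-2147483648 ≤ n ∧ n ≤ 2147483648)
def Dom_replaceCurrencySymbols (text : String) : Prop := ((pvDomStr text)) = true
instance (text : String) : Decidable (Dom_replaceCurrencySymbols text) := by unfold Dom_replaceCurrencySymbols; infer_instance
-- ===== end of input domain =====

-- B replaces A's four sequential full-text replace passes by one left-to-right scan that
-- looks each 3-character window up in a table (objective: alternative single-pass algorithm).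

-- ===== PORT A =====
-- literal port of A: a dict literal, then a for-loop over its items doing text.replace
def replaceCurrencySymbols (text : String) : String :=
  let currency_symbols : PySem.Dict String String :=
    PySem.Dict.ofList [("USD", "$"), ("EUR", "€"), ("JPY", "¥"), ("GBP", "£")]
  currency_symbols.items.foldl (fun t p => PySem.Str.replace t p.1 p.2) text

-- ===== PORT B =====
-- B's table: the same four codes (3-char keys, on the List Char side) mapped to their symbols
def pvMapB : PySem.Dict (List Char) Char :=
  PySem.Dict.ofList
    [(['U', 'S', 'D'], '$'), (['E', 'U', 'R'], '€'), (['J', 'P', 'Y'], '¥'), (['G', 'B', 'P'], '£')]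

-- B's while-loop over positions i, recast structurally over the remaining suffix:
-- look up the 3-char window; on a hit emit the symbol and advance 3, else emit the char and advance 1
def pvAltGo : List Char → List Char
  | [] => []
  | c :: t =>
    match pvMapB.get? ((c :: t).take 3) with
    | some sym => sym :: pvAltGo ((c :: t).drop 3)
    | none => c :: pvAltGo t
termination_by l => l.length
decreasing_by all_goals (simp; try omega)

def replaceCurrencySymbols_alt (text : String) : String :=
  String.ofList (pvAltGo text.toList)

-- ===== PRECONDITION & SPEC =====
def Spec_replaceCurrencySymbols (text : String) (out : String) : Prop := out = replaceCurrencySymbols_alt text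
instance (text : String) (out : String) : Decidable (Spec_replaceCurrencySymbols text out) := by unfold Spec_replaceCurrencySymbols; infer_instance

-- ===== CLAIM (what is proved, stated in full; the proofs are below) =====
def Claim_equal_replaceCurrencySymbols : Prop := ∀ (text : String), Dom_replaceCurrencySymbols text → Spec_replaceCurrencySymbols text (replaceCurrencySymbols text)

-- ===== LEMMAS AND PROOFS =====

-- simple characterisation of one CPython str.replace pass with a 3-char pattern and 1-char replacement
def repS3 (a b c' sym : Char) : List Char → List Char
  | x :: y :: z :: t =>
    if x = a ∧ y = b ∧ z = c' then sym :: repS3 a b c' sym t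
    else x :: repS3 a b c' sym (y :: z :: t)
  | l => l
termination_by l => l.length

theorem go_eq (a b c' sym : Char) :
    ∀ (fuel : Nat) (l acc : List Char), l.length ≤ fuel →
      PySem.Chars.replace.go [a, b, c'] [sym] fuel l acc
        = acc.reverse ++ repS3 a b c' sym l := by
  intro fuel
  induction fuel with
  | zero =>
    intro l acc h
    have : l = [] := by cases l <;> simp_all
    subst this
    simp [PySem.Chars.replace.go, repS3]
  | succ n ih =>
    intro l acc h
    match l with
    | [] => simp [PySem.Chars.replace.go, repS3]
    | c :: t =>
      rw [PySem.Chars.replace.go]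
      by_cases hp : List.isPrefixOf [a, b, c'] (c :: t) = true
      · simp only [hp, if_true]
        have hshape : ∃ t', c = a ∧ t = b :: c' :: t' := by
          cases t with
          | nil => simp [List.isPrefixOf] at hp
          | cons y t2 =>
            cases t2 with
            | nil => simp [List.isPrefixOf] at hp
            | cons z t3 =>
              simp [List.isPrefixOf] at hp
              exact ⟨t3, hp.1.symm, by simp [hp.2.1.symm, hp.2.2.symm]⟩
        obtain ⟨t', hc, ht⟩ := hshape
        subst ht
        rw [hc]
        have hdrop : List.drop [a, b, c'].length (a :: b :: c' :: t') = t' := by simp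
        rw [hdrop, ih t' ([sym].reverse ++ acc) (by simp at h ⊢; omega)]
        rw [repS3]
        simp
      · simp only [hp]
        rw [ih t (c :: acc) (by simp at h ⊢; omega)]
        cases t with
        | nil => simp [repS3]
        | cons y t2 =>
          cases t2 with
          | nil => simp [repS3]
          | cons z t3 =>
            simp [List.isPrefixOf] at hp
            conv_rhs => rw [repS3]
            rw [if_neg (by tauto)]
            simp
            intro h1 h2 h3
            exact absurd h3.symm (hp h1.symm h2.symm)

theorem replace_eq (a b c' sym : Char) (l : List Char) :
    PySem.Chars.replace l [a, b, c'] [sym] = repS3 a b c' sym l := by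
  rw [PySem.Chars.replace]
  simp only [List.isEmpty_cons, if_false, Bool.false_eq_true]
  exact go_eq a b c' sym l.length l [] (le_refl _)

-- one step of repS3 when the pattern does not match at the head
theorem repS3_miss (a b c' sym x : Char) (t : List Char)
    (h : ¬(x = a ∧ t.take 2 = [b, c'])) :
    repS3 a b c' sym (x :: t) = x :: repS3 a b c' sym t := by
  match t with
  | [] => simp [repS3]
  | [y] => simp [repS3]
  | y :: z :: t3 =>
    rw [repS3]
    rw [if_neg (by simp at h ⊢; intro h1 h2; exact h h1 (by simp [h2]))]

theorem repS3_head (a b c' sym x : Char) (t : List Char) (h : x ≠ a) :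
    repS3 a b c' sym (x :: t) = x :: repS3 a b c' sym t :=
  repS3_miss a b c' sym x t (fun hc => h hc.1)

theorem repS3_match (a b c' sym : Char) (t : List Char) :
    repS3 a b c' sym (a :: b :: c' :: t) = sym :: repS3 a b c' sym t := by
  simp [repS3]

-- a prefix that avoids the replacement symbol survives a replace pass backwards
theorem repS3_prefix (a b c' sym : Char) :
    ∀ n (u p : List Char), u.length ≤ n → sym ∉ p →
      p <+: repS3 a b c' sym u → p <+: u := by
  intro n
  induction n with
  | zero =>
    intro u p hu _ hp
    have : u = [] := by cases u <;> simp_all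
    subst this
    simpa [repS3] using hp
  | succ n ih =>
    intro u p hu hs hp
    match u with
    | [] => simpa [repS3] using hp
    | [x] => simpa [repS3] using hp
    | [x, y] => simpa [repS3] using hp
    | x :: y :: z :: t =>
      by_cases hc : x = a ∧ y = b ∧ z = c'
      · rw [repS3, if_pos hc] at hp
        cases p with
        | nil => exact List.nil_prefix
        | cons q p' =>
          rw [List.cons_prefix_cons] at hp
          exact absurd (hp.1 ▸ List.mem_cons_self) hs
      · rw [repS3, if_neg hc] at hp
        cases p with
        | nil => exact List.nil_prefix
        | cons q p' =>
          rw [List.cons_prefix_cons] at hp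
          have := ih (y :: z :: t) p' (by simp at hu ⊢; omega)
            (fun hm => hs (List.mem_cons_of_mem q hm)) hp.2
          exact List.cons_prefix_cons.mpr ⟨hp.1, this⟩

-- pattern-at-head in the cond form used by repS3_miss, from an IsPrefix fact
theorem prefix3_iff (a b c' x : Char) (t : List Char) :
    [a, b, c'] <+: (x :: t) ↔ x = a ∧ t.take 2 = [b, c'] := by
  rw [List.prefix_iff_eq_take]
  constructor
  · intro h
    have h' : [a, b, c'] = x :: t.take 2 := by simpa using h
    injection h' with h1 h2
    exact ⟨h1.symm, h2.symm⟩
  · rintro ⟨h1, h2⟩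
    simp [h1, h2]

theorem take2_shape {t : List Char} {y z : Char} (h : t.take 2 = [y, z]) :
    ∃ r, t = y :: z :: r := by
  match t with
  | [] => simp at h
  | [w] => simp at h
  | w :: v :: r =>
    simp at h
    exact ⟨r, by simp [h.1, h.2]⟩

theorem pvAltGo_cons (c : Char) (t : List Char) :
    pvAltGo (c :: t) =
      match pvMapB.get? ((c :: t).take 3) with
      | some sym => sym :: pvAltGo ((c :: t).drop 3)
      | none => c :: pvAltGo t := by
  rw [pvAltGo]

theorem get_pvMapB_none (c : Char) (t : List Char)
    (hU : ¬(c = 'U' ∧ t.take 2 = ['S', 'D'])) (hE : ¬(c = 'E' ∧ t.take 2 = ['U', 'R']))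
    (hJ : ¬(c = 'J' ∧ t.take 2 = ['P', 'Y'])) (hG : ¬(c = 'G' ∧ t.take 2 = ['B', 'P'])) :
    pvMapB.get? ((c :: t).take 3) = none := by
  have htake : (c :: t).take 3 = c :: t.take 2 := by simp
  rw [htake]
  have hm : pvMapB = PySem.Dict.mk
      [(['U', 'S', 'D'], '$'), (['E', 'U', 'R'], '€'), (['J', 'P', 'Y'], '¥'), (['G', 'B', 'P'], '£')] := by
    decide
  rw [hm]
  rw [PySem.Dict.get?_mk_cons, if_neg (by intro h; simp at h; exact hU ⟨h.1.symm, by simp [h.2.symm]⟩)]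
  rw [PySem.Dict.get?_mk_cons, if_neg (by intro h; simp at h; exact hE ⟨h.1.symm, by simp [h.2.symm]⟩)]
  rw [PySem.Dict.get?_mk_cons, if_neg (by intro h; simp at h; exact hJ ⟨h.1.symm, by simp [h.2.symm]⟩)]
  rw [PySem.Dict.get?_mk_cons, if_neg (by intro h; simp at h; exact hG ⟨h.1.symm, by simp [h.2.symm]⟩)]
  simp [PySem.Dict.get?]

-- the composition of A's four passes, on the character-list side
def pvA4 (l : List Char) : List Char :=
  repS3 'G' 'B' 'P' '£' (repS3 'J' 'P' 'Y' '¥' (repS3 'E' 'U' 'R' '€' (repS3 'U' 'S' 'D' '$' l)))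

theorem main_eq : ∀ n (l : List Char), l.length ≤ n → pvA4 l = pvAltGo l := by
  intro n
  induction n with
  | zero =>
    intro l h
    have : l = [] := by cases l <;> simp_all
    subst this
    simp [pvA4, repS3, pvAltGo]
  | succ n ih =>
    intro l h
    match l with
    | [] => simp [pvA4, repS3, pvAltGo]
    | c :: t =>
      rw [pvAltGo_cons]
      by_cases hU : c = 'U' ∧ t.take 2 = ['S', 'D']
      · obtain ⟨r, hr⟩ := take2_shape hU.2
        subst hr
        rw [hU.1]
        have hget : pvMapB.get? (('U' :: 'S' :: 'D' :: r).take 3) = some '$' := by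
          have : ('U' :: 'S' :: 'D' :: r).take 3 = ['U', 'S', 'D'] := by simp
          rw [this]; decide
        rw [hget]
        simp only [pvA4, repS3_match]
        rw [repS3_head 'E' 'U' 'R' '€' '$' _ (by decide)]
        rw [repS3_head 'J' 'P' 'Y' '¥' '$' _ (by decide)]
        rw [repS3_head 'G' 'B' 'P' '£' '$' _ (by decide)]
        have hrec := ih r (by simp at h ⊢; omega)
        simp only [pvA4] at hrec
        simp [hrec]
      · by_cases hE : c = 'E' ∧ t.take 2 = ['U', 'R']
        · obtain ⟨r, hr⟩ := take2_shape hE.2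
          subst hr
          rw [hE.1]
          have hget : pvMapB.get? (('E' :: 'U' :: 'R' :: r).take 3) = some '€' := by
            have : ('E' :: 'U' :: 'R' :: r).take 3 = ['E', 'U', 'R'] := by simp
            rw [this]; decide
          rw [hget]
          simp only [pvA4]
          rw [repS3_head 'U' 'S' 'D' '$' 'E' _ (by decide)]
          rw [repS3_miss 'U' 'S' 'D' '$' 'U' _ (by simp)]
          rw [repS3_head 'U' 'S' 'D' '$' 'R' _ (by decide)]
          rw [repS3_match]
          rw [repS3_head 'J' 'P' 'Y' '¥' '€' _ (by decide)]
          rw [repS3_head 'G' 'B' 'P' '£' '€' _ (by decide)]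
          have hrec := ih r (by simp at h ⊢; omega)
          simp only [pvA4] at hrec
          simp [hrec]
        · by_cases hJ : c = 'J' ∧ t.take 2 = ['P', 'Y']
          · obtain ⟨r, hr⟩ := take2_shape hJ.2
            subst hr
            rw [hJ.1]
            have hget : pvMapB.get? (('J' :: 'P' :: 'Y' :: r).take 3) = some '¥' := by
              have : ('J' :: 'P' :: 'Y' :: r).take 3 = ['J', 'P', 'Y'] := by simp
              rw [this]; decide
            rw [hget]
            simp only [pvA4]
            rw [repS3_head 'U' 'S' 'D' '$' 'J' _ (by decide)]
            rw [repS3_head 'U' 'S' 'D' '$' 'P' _ (by decide)]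
            rw [repS3_head 'U' 'S' 'D' '$' 'Y' _ (by decide)]
            rw [repS3_head 'E' 'U' 'R' '€' 'J' _ (by decide)]
            rw [repS3_head 'E' 'U' 'R' '€' 'P' _ (by decide)]
            rw [repS3_head 'E' 'U' 'R' '€' 'Y' _ (by decide)]
            rw [repS3_match]
            rw [repS3_head 'G' 'B' 'P' '£' '¥' _ (by decide)]
            have hrec := ih r (by simp at h ⊢; omega)
            simp only [pvA4] at hrec
            simp [hrec]
          · by_cases hG : c = 'G' ∧ t.take 2 = ['B', 'P']
            · obtain ⟨r, hr⟩ := take2_shape hG.2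
              subst hr
              rw [hG.1]
              have hget : pvMapB.get? (('G' :: 'B' :: 'P' :: r).take 3) = some '£' := by
                have : ('G' :: 'B' :: 'P' :: r).take 3 = ['G', 'B', 'P'] := by simp
                rw [this]; decide
              rw [hget]
              simp only [pvA4]
              rw [repS3_head 'U' 'S' 'D' '$' 'G' _ (by decide)]
              rw [repS3_head 'U' 'S' 'D' '$' 'B' _ (by decide)]
              rw [repS3_head 'U' 'S' 'D' '$' 'P' _ (by decide)]
              rw [repS3_head 'E' 'U' 'R' '€' 'G' _ (by decide)]
              rw [repS3_head 'E' 'U' 'R' '€' 'B' _ (by decide)]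
              rw [repS3_head 'E' 'U' 'R' '€' 'P' _ (by decide)]
              rw [repS3_head 'J' 'P' 'Y' '¥' 'G' _ (by decide)]
              rw [repS3_head 'J' 'P' 'Y' '¥' 'B' _ (by decide)]
              rw [repS3_miss 'J' 'P' 'Y' '¥' 'P' _ (by simp)]
              rw [repS3_match]
              have hrec := ih r (by simp at h ⊢; omega)
              simp only [pvA4] at hrec
              simp [hrec]
            · -- no code matches at this position: every pass steps over c
              rw [get_pvMapB_none c t hU hE hJ hG]
              have e1 : repS3 'U' 'S' 'D' '$' (c :: t) = c :: repS3 'U' 'S' 'D' '$' t :=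
                repS3_miss _ _ _ _ _ _ hU
              have hE' : ¬(c = 'E' ∧ (repS3 'U' 'S' 'D' '$' t).take 2 = ['U', 'R']) := by
                intro hc
                have hpre : ['E', 'U', 'R'] <+: repS3 'U' 'S' 'D' '$' (c :: t) := by
                  rw [e1]; exact (prefix3_iff _ _ _ _ _).mpr hc
                have := repS3_prefix 'U' 'S' 'D' '$' (c :: t).length (c :: t) _ (le_refl _)
                  (by decide) hpre
                exact hE ((prefix3_iff _ _ _ _ _).mp this)
              have e2 : repS3 'E' 'U' 'R' '€' (repS3 'U' 'S' 'D' '$' (c :: t))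
                  = c :: repS3 'E' 'U' 'R' '€' (repS3 'U' 'S' 'D' '$' t) := by
                rw [e1]; exact repS3_miss _ _ _ _ _ _ hE'
              have hJ' : ¬(c = 'J' ∧
                  (repS3 'E' 'U' 'R' '€' (repS3 'U' 'S' 'D' '$' t)).take 2 = ['P', 'Y']) := by
                intro hc
                have hpre : ['J', 'P', 'Y'] <+:
                    repS3 'E' 'U' 'R' '€' (repS3 'U' 'S' 'D' '$' (c :: t)) := by
                  rw [e2]; exact (prefix3_iff _ _ _ _ _).mpr hc
                have h2 := repS3_prefix 'E' 'U' 'R' '€'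
                  (repS3 'U' 'S' 'D' '$' (c :: t)).length _ _ (le_refl _) (by decide) hpre
                have h3 := repS3_prefix 'U' 'S' 'D' '$' (c :: t).length (c :: t) _ (le_refl _)
                  (by decide) h2
                exact hJ ((prefix3_iff _ _ _ _ _).mp h3)
              have e3 : repS3 'J' 'P' 'Y' '¥' (repS3 'E' 'U' 'R' '€' (repS3 'U' 'S' 'D' '$' (c :: t)))
                  = c :: repS3 'J' 'P' 'Y' '¥' (repS3 'E' 'U' 'R' '€' (repS3 'U' 'S' 'D' '$' t)) := by
                rw [e2]; exact repS3_miss _ _ _ _ _ _ hJ'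
              have hG' : ¬(c = 'G' ∧
                  (repS3 'J' 'P' 'Y' '¥' (repS3 'E' 'U' 'R' '€' (repS3 'U' 'S' 'D' '$' t))).take 2
                    = ['B', 'P']) := by
                intro hc
                have hpre : ['G', 'B', 'P'] <+:
                    repS3 'J' 'P' 'Y' '¥' (repS3 'E' 'U' 'R' '€' (repS3 'U' 'S' 'D' '$' (c :: t))) := by
                  rw [e3]; exact (prefix3_iff _ _ _ _ _).mpr hc
                have h2 := repS3_prefix 'J' 'P' 'Y' '¥' _ _ _ (le_refl _) (by decide) hpre
                have h3 := repS3_prefix 'E' 'U' 'R' '€' _ _ _ (le_refl _) (by decide) h2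
                have h4 := repS3_prefix 'U' 'S' 'D' '$' _ _ _ (le_refl _) (by decide) h3
                exact hG ((prefix3_iff _ _ _ _ _).mp h4)
              have e4 : pvA4 (c :: t) = c :: pvA4 t := by
                simp only [pvA4]
                rw [e3]; exact repS3_miss _ _ _ _ _ _ hG'
              rw [e4, ih t (by simp at h; omega)]

-- ===== VERDICT (by name: the statement is the Claim_ definition above) =====
theorem replaceCurrencySymbols_spec : Claim_equal_replaceCurrencySymbols := by
  intro text _
  unfold Spec_replaceCurrencySymbols
  show replaceCurrencySymbols text = replaceCurrencySymbols_alt text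
  have hA : replaceCurrencySymbols text =
      PySem.Str.replace (PySem.Str.replace (PySem.Str.replace
        (PySem.Str.replace text "USD" "$") "EUR" "€") "JPY" "¥") "GBP" "£" := rfl
  rw [hA]
  show String.ofList (PySem.Chars.replace
      (String.ofList (PySem.Chars.replace
        (String.ofList (PySem.Chars.replace
          (String.ofList (PySem.Chars.replace text.toList ['U','S','D'] ['$'])).toList
          ['E','U','R'] ['€'])).toList
        ['J','P','Y'] ['¥'])).toList
      ['G','B','P'] ['£']) = replaceCurrencySymbols_alt text
  rw [String.toList_ofList, String.toList_ofList, String.toList_ofList]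
  rw [replace_eq, replace_eq, replace_eq, replace_eq]
  show String.ofList (pvA4 text.toList) = replaceCurrencySymbols_alt text
  rw [main_eq text.toList.length text.toList (le_refl _)]
  rfl
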